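-- pv_equiv track=rewrite | github.com/PseudoSkull/QuickTranscribe | handle_wikidata.py | extract_wikisource_page_title
-- ===== SOURCE A (Python) =====
-- def extract_wikisource_page_title(link):
--     namespaces = [
--         "Author",
--         "Portal",
--         "Index",
--         "Page",
--         "Template",
--         "Category",
--         "Wikisource",
--     ]
--     if link.startswith("[[") and link.endswith("]]"):
--         link = link[2:-2]  # Remove the double square brackets
--
--         for namespace in namespaces:
--             if link.startswith(namespace + ":"):
--                 page_title = link[len(namespace) + 1:].strip()  # Remove namespace and colon
--                 return page_title
--
--     return link
-- ===== SOURCE B (Python) =====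
-- _WORDS = ["Author:", "Portal:", "Index:", "Page:", "Template:", "Category:", "Wikisource:"]
--
-- def extract_wikisource_page_title(link):
--     if link.startswith("[[") and link.endswith("]]"):
--         inner = link[2:-2]
--         # online parallel-prefix scan: walk inner once, maintaining the list of
--         # candidate suffixes still consistent with the characters read so far
--         cands = _WORDS
--         for i, ch in enumerate(inner):
--             if not cands:
--                 break
--             if any(w == ch for w in cands):   # some candidate fully consumed
--                 return inner[i + 1:].strip()
--             cands = [w[1:] for w in cands if w[0] == ch]
--         return inner
--     return link
-- ===== Notes on version B (the rewrite author's own statement) =====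
-- stated objective: alternative
-- what changed: Replaces A's loop over the seven namespaces each tested with startswith by a single left-to-right scan of the inner text that maintains a shrinking list of candidate suffixes (an online breadth-wise trie walk): at each character it prunes candidates and returns as soon as one candidate is fully consumed.
import Mathlib
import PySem

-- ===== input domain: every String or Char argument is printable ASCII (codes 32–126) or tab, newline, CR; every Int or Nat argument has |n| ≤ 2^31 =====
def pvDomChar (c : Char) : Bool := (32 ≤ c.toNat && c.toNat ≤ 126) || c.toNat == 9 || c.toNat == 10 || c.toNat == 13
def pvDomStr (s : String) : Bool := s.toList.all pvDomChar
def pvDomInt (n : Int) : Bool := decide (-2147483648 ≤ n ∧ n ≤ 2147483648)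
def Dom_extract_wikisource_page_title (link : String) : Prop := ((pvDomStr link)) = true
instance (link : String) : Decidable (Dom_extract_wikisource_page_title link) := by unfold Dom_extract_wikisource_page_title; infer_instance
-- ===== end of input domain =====

-- B replaces A's loop over seven namespaces each tested with startswith by a single
-- left-to-right scan of the inner text maintaining a shrinking list of candidate
-- suffixes (an online breadth-wise trie walk); objective: alternative. Return values agree everywhere.

-- ===== PORT A =====
-- the 'for namespace in namespaces' loop with its early return
def pvALoop (l : String) : List String → Option String
  | [] => none
  | ns :: rest =>
    if PySem.Str.startswith l (ns ++ ":") then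
      some (PySem.Str.strip (PySem.Str.slice l (some ((PySem.Str.len ns : Int) + 1)) none))
    else pvALoop l rest

def extract_wikisource_page_title (link : String) : String :=
  let namespaces := ["Author", "Portal", "Index", "Page", "Template", "Category", "Wikisource"]
  if PySem.Str.startswith link "[[" && PySem.Str.endswith link "]]" then
    let link' := PySem.Str.slice link (some 2) (some (-2))
    (pvALoop link' namespaces).getD link'
  else link

-- ===== PORT B =====
def pvWords : List String := ["Author:", "Portal:", "Index:", "Page:", "Template:", "Category:", "Wikisource:"]

-- the 'for i, ch in enumerate(inner)' loop: prune candidate suffixes by the current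
-- character; returning 'some rest' is Python's 'return inner[i+1:]...' since rest IS inner[i+1:].
-- (the '[]' arm of the inner match is unreachable: cands never holds an empty suffix)
def pvScan : List (List Char) → List Char → Option (List Char)
  | _, [] => none
  | cands, c :: rest =>
    if cands.isEmpty then none
    else if cands.any (fun w => w = [c]) then some rest
    else pvScan (cands.filterMap (fun w =>
            match w with
            | c' :: w' => if c' = c then some w' else none
            | [] => none)) rest

def extract_wikisource_page_title_alt (link : String) : String :=
  if PySem.Str.startswith link "[[" && PySem.Str.endswith link "]]" then
    let inner := PySem.Str.slice link (some 2) (some (-2))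
    match pvScan (pvWords.map String.toList) inner.toList with
    | some rest => String.ofList (PySem.Chars.strip rest)
    | none => inner
  else link

-- ===== PRECONDITION & SPEC =====
def Spec_extract_wikisource_page_title (link : String) (out : String) : Prop := out = extract_wikisource_page_title_alt link
instance (link : String) (out : String) : Decidable (Spec_extract_wikisource_page_title link out) := by unfold Spec_extract_wikisource_page_title; infer_instance

-- ===== CLAIM (what is proved, stated in full; the proofs are below) =====
def Claim_equal_extract_wikisource_page_title : Prop := ∀ (link : String), Dom_extract_wikisource_page_title link → Spec_extract_wikisource_page_title link (extract_wikisource_page_title link)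

-- ===== LEMMAS AND PROOFS =====

-- soundness: a successful scan exhibits some candidate as a prefix of the input
lemma pvScan_sound (cs : List Char) : ∀ (cands : List (List Char)) (r : List Char),
    pvScan cands cs = some r → ∃ w ∈ cands, cs = w ++ r := by
  induction cs with
  | nil => intro cands r h; simp [pvScan] at h
  | cons c rest ih =>
    intro cands r h
    rw [pvScan] at h
    by_cases he : cands.isEmpty
    · simp [he] at h
    · rw [if_neg he] at h
      by_cases ha : cands.any (fun w => w = [c])
      · rw [if_pos ha, Option.some_inj] at h
        obtain ⟨w, hw, hwc⟩ := List.any_eq_true.mp ha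
        exact ⟨w, hw, by simp at hwc; simp [hwc, h]⟩
      · rw [if_neg ha] at h
        obtain ⟨w', hw', hr⟩ := ih _ r h
        obtain ⟨w, hw, hm⟩ := List.mem_filterMap.mp hw'
        match w, hm with
        | c' :: w'', hm =>
          by_cases hc : c' = c
          · simp only [hc, if_true, Option.some_inj] at hm
            exact ⟨c :: w'', hc ▸ hw, by simp [hm, hr]⟩
          · simp [hc] at hm

-- completeness: if a member is a prefix and the candidate list is prefix-free with no
-- empty member, the scan finds exactly that split
lemma pvScan_complete (w : List Char) : ∀ (cands : List (List Char)) (r : List Char),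
    w ∈ cands → (∀ v ∈ cands, v ≠ []) →
    (∀ u ∈ cands, ∀ v ∈ cands, u <+: v → u = v) →
    pvScan cands (w ++ r) = some r := by
  induction w with
  | nil => intro cands r hw hne _; exact absurd rfl (hne [] hw)
  | cons c w' ih =>
    intro cands r hw hne hpf
    have hnemp : cands.isEmpty = false := by
      cases cands with
      | nil => exact absurd hw (List.not_mem_nil)
      | cons a l => rfl
    rw [List.cons_append, pvScan, hnemp]
    simp only [Bool.false_eq_true, if_false]
    by_cases ha : cands.any (fun v => v = [c])
    · rw [if_pos ha]
      obtain ⟨v, hv, hvc⟩ := List.any_eq_true.mp ha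
      simp only [decide_eq_true_eq] at hvc
      have : v <+: c :: w' := by rw [hvc]; exact ⟨w', rfl⟩
      have heq := hpf v hv (c :: w') hw this
      rw [hvc] at heq
      have : w' = [] := by simpa using heq.symm
      simp [this]
    · rw [if_neg ha]
      have hw'ne : w' ≠ [] := by
        intro h
        apply ha
        refine List.any_eq_true.mpr ⟨c :: w', hw, ?_⟩
        simp [h]
      apply ih
      · exact List.mem_filterMap.mpr ⟨c :: w', hw, by simp⟩
      · intro v' hv'
        obtain ⟨v, hv, hm⟩ := List.mem_filterMap.mp hv'
        match v, hm with
        | c' :: v'', hm =>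
          by_cases hc : c' = c
          · simp only [hc, if_true, Option.some_inj] at hm
            subst hm
            intro hnil
            subst hnil
            apply ha
            refine List.any_eq_true.mpr ⟨c' :: [], hv, by simp [hc]⟩
          · simp [hc] at hm
      · intro u' hu' v' hv' hpre
        obtain ⟨u, hu, hmu⟩ := List.mem_filterMap.mp hu'
        obtain ⟨v, hv, hmv⟩ := List.mem_filterMap.mp hv'
        match u, v, hmu, hmv with
        | cu :: u'', cv :: v'', hmu, hmv =>
          by_cases hcu : cu = c
          · by_cases hcv : cv = c
            · simp only [hcu, if_true, Option.some_inj] at hmu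
              simp only [hcv, if_true, Option.some_inj] at hmv
              subst hmu; subst hmv
              have hp2 : cu :: u'' <+: cv :: v'' := by
                rw [hcu, hcv]; exact List.cons_prefix_cons.mpr ⟨rfl, hpre⟩
              have := hpf _ hu _ hv hp2
              exact (List.cons_eq_cons.mp this).2
            · simp [hcv] at hmv
          · simp [hcu] at hmu

-- the two literal-list side conditions of pvScan_complete, once for the initial words
lemma pvWords_ne : ∀ v ∈ pvWords.map String.toList, v ≠ [] := by decide
lemma pvWords_pf : ∀ u ∈ pvWords.map String.toList, ∀ v ∈ pvWords.map String.toList, u <+: v → u = v := by decide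

-- the string A returns in a matched branch equals the string B returns
lemma strip_slice_eq (l ns : String) (r : List Char)
    (hl : l.toList = (ns ++ ":").toList ++ r) :
    PySem.Str.strip (PySem.Str.slice l (some ((PySem.Str.len ns : Int) + 1)) none)
      = String.ofList (PySem.Chars.strip r) := by
  have htail : (PySem.Str.slice l (some ((PySem.Str.len ns : Int) + 1)) none).toList = r := by
    have hcast : ((PySem.Str.len ns : Int) + 1) = ((ns.toList.length + 1 : Nat) : Int) := by
      rw [PySem.Str.len_eq]; push_cast; ring
    have hsl : (PySem.Str.slice l (some ((ns.toList.length + 1 : Nat) : Int)) none).toList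
        = PySem.List.slice l.toList (some ((ns.toList.length + 1 : Nat) : Int)) none := by simp
    have hlen : (ns ++ ":").toList.length = ns.toList.length + 1 := by
      simp [String.toList_append]
    rw [hcast, hsl, PySem.List.slice_from_natCast, hl, ← hlen, List.drop_left]
  conv_lhs => rw [← String.ofList_toList
    (s := PySem.Str.strip (PySem.Str.slice l (some ((PySem.Str.len ns : Int) + 1)) none))]
  rw [PySem.Str.toList_strip, htail]

-- a fired startswith test in A: B's scan completes at the same split, with equal output
lemma matched_case (s ns : String)
    (hmem : (ns ++ ":").toList ∈ pvWords.map String.toList)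
    (h : PySem.Str.startswith s (ns ++ ":") = true) :
    (match pvScan (pvWords.map String.toList) s.toList with
     | some rest => String.ofList (PySem.Chars.strip rest)
     | none => s)
      = PySem.Str.strip (PySem.Str.slice s (some ((PySem.Str.len ns : Int) + 1)) none) := by
  rw [PySem.Str.startswith_eq] at h
  obtain ⟨r, hr⟩ := (PySem.Chars.startswith_iff _ _).mp h
  have hs : s.toList = (ns ++ ":").toList ++ r := hr.symm
  have hscan : pvScan (pvWords.map String.toList) s.toList = some r := by
    rw [hs]; exact pvScan_complete _ _ _ hmem pvWords_ne pvWords_pf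
  rw [hscan]
  exact (strip_slice_eq s ns r hs).symm

-- core: on the bracket-stripped inner string, A's namespace loop and B's candidate scan agree
lemma core (s : String) :
    (pvALoop s ["Author", "Portal", "Index", "Page", "Template", "Category", "Wikisource"]).getD s
    = (match pvScan (pvWords.map String.toList) s.toList with
       | some rest => String.ofList (PySem.Chars.strip rest)
       | none => s) := by
  by_cases h1 : PySem.Str.startswith s ("Author" ++ ":") = true
  · simp only [pvALoop, h1, if_true, Option.getD_some]
    exact (matched_case s "Author" (by decide) h1).symm
  by_cases h2 : PySem.Str.startswith s ("Portal" ++ ":") = true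
  · simp only [pvALoop, h1, h2, if_true, Bool.false_eq_true, if_false, Option.getD_some]
    exact (matched_case s "Portal" (by decide) h2).symm
  by_cases h3 : PySem.Str.startswith s ("Index" ++ ":") = true
  · simp only [pvALoop, h1, h2, h3, if_true, Bool.false_eq_true, if_false, Option.getD_some]
    exact (matched_case s "Index" (by decide) h3).symm
  by_cases h4 : PySem.Str.startswith s ("Page" ++ ":") = true
  · simp only [pvALoop, h1, h2, h3, h4, if_true, Bool.false_eq_true, if_false, Option.getD_some]
    exact (matched_case s "Page" (by decide) h4).symm
  by_cases h5 : PySem.Str.startswith s ("Template" ++ ":") = true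
  · simp only [pvALoop, h1, h2, h3, h4, h5, if_true, Bool.false_eq_true, if_false, Option.getD_some]
    exact (matched_case s "Template" (by decide) h5).symm
  by_cases h6 : PySem.Str.startswith s ("Category" ++ ":") = true
  · simp only [pvALoop, h1, h2, h3, h4, h5, h6, if_true, Bool.false_eq_true, if_false, Option.getD_some]
    exact (matched_case s "Category" (by decide) h6).symm
  by_cases h7 : PySem.Str.startswith s ("Wikisource" ++ ":") = true
  · simp only [pvALoop, h1, h2, h3, h4, h5, h6, h7, if_true, Bool.false_eq_true, if_false, Option.getD_some]
    exact (matched_case s "Wikisource" (by decide) h7).symm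
  -- no namespace matches: the loop returns none, and the scan cannot succeed
  have hA : pvALoop s ["Author", "Portal", "Index", "Page", "Template", "Category", "Wikisource"] = none := by
    simp only [pvALoop, h1, h2, h3, h4, h5, h6, h7, Bool.false_eq_true, if_false]
  rw [hA]
  rcases hscan : pvScan (pvWords.map String.toList) s.toList with _ | r
  · rfl
  · exfalso
    obtain ⟨w, hw, hcs⟩ := pvScan_sound _ _ _ hscan
    have hpre : ∀ (ns : String), w = (ns ++ ":").toList →
        PySem.Str.startswith s (ns ++ ":") = true := by
      intro ns hwns
      rw [PySem.Str.startswith_eq]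
      exact (PySem.Chars.startswith_iff _ _).mpr ⟨r, by rw [← hwns, hcs]⟩
    simp only [pvWords, List.map_cons, List.map_nil, List.mem_cons, List.not_mem_nil,
      or_false] at hw
    rcases hw with h | h | h | h | h | h | h
    · exact h1 (hpre "Author" (by rw [h]; decide))
    · exact h2 (hpre "Portal" (by rw [h]; decide))
    · exact h3 (hpre "Index" (by rw [h]; decide))
    · exact h4 (hpre "Page" (by rw [h]; decide))
    · exact h5 (hpre "Template" (by rw [h]; decide))
    · exact h6 (hpre "Category" (by rw [h]; decide))
    · exact h7 (hpre "Wikisource" (by rw [h]; decide))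

-- ===== VERDICT (by name: the statement is the Claim_ definition above) =====
theorem extract_wikisource_page_title_spec : Claim_equal_extract_wikisource_page_title := by
  intro link _
  unfold Spec_extract_wikisource_page_title
  unfold extract_wikisource_page_title extract_wikisource_page_title_alt
  by_cases hg : (PySem.Str.startswith link "[[" && PySem.Str.endswith link "]]") = true
  · simp only [hg, if_true]
    exact core (PySem.Str.slice link (some 2) (some (-2)))
  · simp only [hg, Bool.false_eq_true, if_false]
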